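-- pv_equiv track=rewrite | github.com/intellectape/Sentiment-Analysis-Twitter-and-IMDB | sentiment.py | constructVector
-- ===== SOURCE A (Python) =====
-- def constructVector(vector, features):
--     vectorList = []
--     for item in vector:
--         binarylist = [0]*len(features)
--         for word in item:
--             if word in features:
--                 binarylist[features.index(word)] = 1
--         vectorList.append(binarylist)
--     return vectorList
-- ===== SOURCE B (Python) =====
-- def constructVector(vector, features):
--     vectorList = []
--     for item in vector:
--         S = set(item)
--         vectorList.append([1 if f in S else 0 for f in features])
--     return vectorList
-- ===== Notes on version B (the rewrite author's own statement) =====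
-- stated objective: idiomatic
-- what changed: B builds each document's word-set once and maps over the feature list with a membership test, instead of scanning the document's words and writing 1 into positions found by a linear features.index search; Pre_ excludes duplicate feature entries, where A marks only the first occurrence and B marks all.
-- outside the precondition, e.g. on constructVector([['a']], ['a', 'a']): A returns [[1, 0]], B returns [[1, 1]]
import Mathlib
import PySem

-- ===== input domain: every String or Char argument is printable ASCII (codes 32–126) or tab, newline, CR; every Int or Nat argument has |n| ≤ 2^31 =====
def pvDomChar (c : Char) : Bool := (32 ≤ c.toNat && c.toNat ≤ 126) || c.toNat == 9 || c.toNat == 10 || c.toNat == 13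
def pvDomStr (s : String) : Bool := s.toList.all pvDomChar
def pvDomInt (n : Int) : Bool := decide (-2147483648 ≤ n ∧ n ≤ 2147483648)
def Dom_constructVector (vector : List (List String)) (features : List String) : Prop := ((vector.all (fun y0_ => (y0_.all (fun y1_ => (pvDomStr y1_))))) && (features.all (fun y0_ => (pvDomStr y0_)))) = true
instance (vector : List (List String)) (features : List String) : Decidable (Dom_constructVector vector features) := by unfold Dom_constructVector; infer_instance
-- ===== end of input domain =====

-- B builds each document's word-set once and tests feature membership, instead of
-- writing into index positions found by features.index; exact for a duplicate-free
-- feature vocabulary (idiomatic re-implementation).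


-- ===== PORT A =====
-- inner loop: 'for word in item: if word in features: binarylist[features.index(word)] = 1'
def cvInnerA (features : List String) (binarylist : List Int) (item : List String) : List Int :=
  item.foldl (fun bl word =>
    if features.contains word then
      PySem.List.pySetD bl (((PySem.List.index? features word).getD 0 : Nat) : Int) 1
    else bl) binarylist

def constructVector (vector : List (List String)) (features : List String) : List (List Int) :=
  vector.foldl (fun vectorList item =>
    vectorList ++ [cvInnerA features (List.replicate features.length 0) item]) []

-- ===== PORT B =====
def constructVector_alt (vector : List (List String)) (features : List String) : List (List Int) :=
  vector.map (fun item =>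
    let S : PySem.Set String := PySem.Set.ofList item
    features.map (fun f => if PySem.Set.contains S f then (1 : Int) else 0))

-- ===== PRECONDITION & SPEC =====
-- Pre_ excludes feature lists with duplicate entries: there A marks only the first
-- occurrence of a duplicated feature while B marks every occurrence — a degenerate
-- vocabulary on which either behaviour is defensible.
def Pre_constructVector (vector : List (List String)) (features : List String) : Prop :=
  features.Nodup
instance (vector : List (List String)) (features : List String) : Decidable (Pre_constructVector vector features) := by unfold Pre_constructVector; infer_instance

def pvWitness_constructVector : List (List String) × List String :=
  ([["x", "y"], ["z"]], ["y", "z", "w"])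

def Spec_constructVector (vector : List (List String)) (features : List String) (out : List (List Int)) : Prop := out = constructVector_alt vector features
instance (vector : List (List String)) (features : List String) (out : List (List Int)) : Decidable (Spec_constructVector vector features out) := by unfold Spec_constructVector; infer_instance

-- ===== CLAIM (what is proved, stated in full; the proofs are below) =====
def Claim_equal_constructVector : Prop := ∀ (vector : List (List String)) (features : List String), Dom_constructVector vector features → Pre_constructVector vector features → Spec_constructVector vector features (constructVector vector features)

-- ===== LEMMAS AND PROOFS =====

-- the inner loop keeps the row length equal to the feature count
theorem cvInnerA_length (features : List String) (item : List String) (bl : List Int)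
    (h : bl.length = features.length) : (cvInnerA features bl item).length = features.length := by
  induction item generalizing bl with
  | nil => simpa [cvInnerA]
  | cons w item ih =>
    simp only [cvInnerA, List.foldl_cons] at *
    split_ifs with hw
    · exact ih _ (by simp [PySem.List.pySetD_natCast, h])
    · exact ih _ h

-- pointwise characterisation of A's inner loop on a duplicate-free vocabulary
theorem cvInnerA_getElem (features : List String) (hnd : features.Nodup)
    (item : List String) (bl : List Int) (h : bl.length = features.length)
    (j : Nat) (hj : j < features.length) :
    (cvInnerA features bl item)[j]'(by rw [cvInnerA_length features item bl h]; exact hj) =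
      if features[j] ∈ item then 1 else bl[j]'(by omega) := by
  induction item generalizing bl with
  | nil => simp [cvInnerA]
  | cons w item ih =>
    simp only [cvInnerA, List.foldl_cons] at *
    by_cases hw : features.contains w
    · have hmem : w ∈ features := by simpa using hw
      have hks : (PySem.List.index? features w).isSome := by
        rw [PySem.List.index?_isSome_iff]; exact hmem
      obtain ⟨k, hk⟩ := Option.isSome_iff_exists.mp hks
      obtain ⟨hklt, hfk, _⟩ := PySem.List.getElem_of_index?_eq_some hk
      have hacc : (if features.contains w = true then
          PySem.List.pySetD bl (((PySem.List.index? features w).getD 0 : Nat) : Int) 1 else bl)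
          = bl.set k 1 := by
        rw [if_pos hw, hk]
        exact PySem.List.pySetD_natCast bl k 1
      simp only [hacc]
      rw [ih (bl.set k 1) (by simp [h])]
      by_cases hwj : features[j] = w
      · have hkj : k = j := hnd.getElem_inj_iff.mp (by rw [hfk, hwj])
        subst hkj
        simp [hwj, List.getElem_set_self]
      · have hkj : k ≠ j := fun e => hwj (by subst e; exact hfk)
        simp [List.getElem_set_ne hkj, List.mem_cons, hwj]
    · have hacc : (if features.contains w = true then
          PySem.List.pySetD bl (((PySem.List.index? features w).getD 0 : Nat) : Int) 1 else bl)
          = bl := if_neg hw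
      simp only [hacc]
      rw [ih bl h]
      have hwm : w ∉ features := by simpa using hw
      have hne : features[j] ≠ w := fun e => hwm (e ▸ features.getElem_mem hj)
      simp [List.mem_cons, hne]

-- A's row equals B's row, per document
theorem cvRow_eq (features : List String) (hnd : features.Nodup) (item : List String) :
    cvInnerA features (List.replicate features.length 0) item =
      features.map (fun f => if PySem.Set.contains (PySem.Set.ofList item) f then (1 : Int) else 0) := by
  have hlen := cvInnerA_length features item (List.replicate features.length 0) (by simp)
  apply List.ext_getElem
  · rw [hlen]; simp
  · intro j hj₁ hj₂
    have hj : j < features.length := by omega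
    rw [cvInnerA_getElem features hnd item _ (by simp) j hj]
    simp only [List.getElem_map]
    by_cases hmem : features[j] ∈ item
    · simp [hmem]
    · simp [hmem, List.getElem_replicate]

-- ===== VERDICT (by name: the statement is the Claim_ definition above) =====
theorem constructVector_spec : Claim_equal_constructVector := by
  intro vector features _ hpre
  unfold Spec_constructVector constructVector constructVector_alt
  rw [PySem.List.foldl_append_singleton_eq_map]
  simp only [List.nil_append]
  exact List.map_congr_left fun item _ => cvRow_eq features hpre item
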